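-- pv_equiv track=rewrite | github.com/lemoosy/house-and-tree | main.py | error_2
-- ===== SOURCE A (Python) =====
-- def error_2(old_values):
-- 	for cursor_1 in range(len(old_values) - 3):
-- 		for cursor_2 in range(len(old_values) - cursor_1 - 4):
-- 			test_1 = old_values[cursor_1 : cursor_1 + 2]
-- 			test_2 = old_values[cursor_1 + cursor_2 + 3 : cursor_1 + cursor_2 + 5]
-- 			if test_1 == test_2 or test_1 == test_2[::-1]:
-- 				return True
-- 	return False
-- ===== SOURCE B (Python) =====
-- def error_2(old_values):
--     # Single pass: canonical (sorted) pair key -> first index seen; a window pair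
--     # equal-or-reversed to an earlier one at gap >= 3 exists iff current index
--     # minus first occurrence of its key is >= 3.
--     first_seen = {}
--     for p in range(len(old_values) - 1):
--         a, b = old_values[p], old_values[p + 1]
--         key = (a, b) if a <= b else (b, a)
--         if key in first_seen:
--             if p - first_seen[key] >= 3:
--                 return True
--         else:
--             first_seen[key] = p
--     return False
-- ===== Notes on version B (the rewrite author's own statement) =====
-- stated objective: faster
-- what changed: Replaced the nested rescan of all window pairs at gap >= 3 by a single pass that canonicalises each 2-element window to a sorted pair and keeps a dict of each key's first index, reporting True as soon as the current index is >= 3 past its key's first occurrence.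
import Mathlib
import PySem

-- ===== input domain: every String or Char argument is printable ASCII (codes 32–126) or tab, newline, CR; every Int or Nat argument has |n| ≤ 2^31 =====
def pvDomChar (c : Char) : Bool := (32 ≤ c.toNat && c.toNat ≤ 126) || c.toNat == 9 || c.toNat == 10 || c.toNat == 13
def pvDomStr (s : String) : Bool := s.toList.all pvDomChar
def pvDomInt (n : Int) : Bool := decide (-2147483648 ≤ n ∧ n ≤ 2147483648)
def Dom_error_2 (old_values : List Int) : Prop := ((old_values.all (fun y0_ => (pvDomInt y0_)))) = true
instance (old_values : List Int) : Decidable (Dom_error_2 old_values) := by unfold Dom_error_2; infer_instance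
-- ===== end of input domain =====

-- B replaces A's O(n^2) nested rescan by a single pass keyed on the canonical
-- (sorted) 2-element window pair with a first-occurrence dict (objective: faster).

-- ===== PORT A =====
-- literal transliteration of A's nested loops with early return (any = return True on first hit)
def error_2 (old_values : List Int) : Bool :=
  (PySem.List.pyRange 0 ((old_values.length : Int) - 3) 1).any (fun cursor_1 =>
    (PySem.List.pyRange 0 ((old_values.length : Int) - cursor_1 - 4) 1).any (fun cursor_2 =>
      let test_1 := PySem.List.slice old_values (some cursor_1) (some (cursor_1 + 2))
      let test_2 := PySem.List.slice old_values (some (cursor_1 + cursor_2 + 3)) (some (cursor_1 + cursor_2 + 5))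
      -- test_2[::-1] = test_2.reverse, exact by PySem.List.slice?_none_none_neg_one
      test_1 == test_2 || test_1 == test_2.reverse))

-- ===== PORT B =====
-- loop body of B with early return, structural recursion over the index list;
-- old_values[p] / old_values[p+1] are always in range here (p ∈ range(len-1)),
-- so pyGetD with default 0 is exact.
def error_2_alt_go (old_values : List Int) (first_seen : PySem.Dict (Int × Int) Int) :
    List Int → Bool
  | [] => false
  | p :: ps =>
    let a := PySem.List.pyGetD old_values p 0
    let b := PySem.List.pyGetD old_values (p + 1) 0
    let key := if a ≤ b then (a, b) else (b, a)
    match first_seen.get? key with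
    | some fp =>
      if 3 ≤ p - fp then true
      else error_2_alt_go old_values first_seen ps
    | none => error_2_alt_go old_values (first_seen.insert key p) ps

def error_2_alt (old_values : List Int) : Bool :=
  error_2_alt_go old_values PySem.Dict.empty
    (PySem.List.pyRange 0 ((old_values.length : Int) - 1) 1)

-- ===== PRECONDITION & SPEC =====
def Spec_error_2 (old_values : List Int) (out : Bool) : Prop := out = error_2_alt old_values
instance (old_values : List Int) (out : Bool) : Decidable (Spec_error_2 old_values out) := by unfold Spec_error_2; infer_instance

-- ===== CLAIM (what is proved, stated in full; the proofs are below) =====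
def Claim_equal_error_2 : Prop := ∀ (old_values : List Int), Dom_error_2 old_values → Spec_error_2 old_values (error_2 old_values)

-- ===== LEMMAS AND PROOFS =====

-- canonical key of the window starting at Int index p (matches B's key)
def pvKey (xs : List Int) (p : Int) : Int × Int :=
  let a := PySem.List.pyGetD xs p 0
  let b := PySem.List.pyGetD xs (p + 1) 0
  if a ≤ b then (a, b) else (b, a)

-- the common characterisation both ports are proved equal to
def pvTgt (xs : List Int) : Prop :=
  ∃ p q : Int, 0 ≤ p ∧ p + 3 ≤ q ∧ q < (xs.length : Int) - 1 ∧ pvKey xs p = pvKey xs q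

lemma pvPairKey (x y z w : Int) :
    ((if x ≤ y then (x, y) else (y, x)) = (if z ≤ w then (z, w) else (w, z))) ↔
      ((x = z ∧ y = w) ∨ (x = w ∧ y = z)) := by
  split_ifs <;> simp [Prod.ext_iff] <;> omega

lemma pvDropTakeTwo (xs : List Int) (m : Nat) (h : m + 1 < xs.length) :
    (xs.drop m).take 2 = [xs.getD m 0, xs.getD (m + 1) 0] := by
  rw [List.drop_eq_getElem_cons (show m < xs.length by omega),
      List.drop_eq_getElem_cons (show m + 1 < xs.length from h),
      show (2 : Nat) = 1 + 1 from rfl, List.take_succ_cons, List.take_succ_cons, List.take_zero,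
      List.getD_eq_getElem xs 0 (show m < xs.length by omega),
      List.getD_eq_getElem xs 0 (show m + 1 < xs.length from h)]

lemma pvSliceTwo (xs : List Int) (a : Int) (h0 : 0 ≤ a) (h2 : a + 2 ≤ (xs.length : Int)) :
    PySem.List.slice xs (some a) (some (a + 2)) =
      [PySem.List.pyGetD xs a 0, PySem.List.pyGetD xs (a + 1) 0] := by
  rw [PySem.List.slice_toNat xs h0 (by omega)]
  have hm : a.toNat + 1 < xs.length := by omega
  have h1 : (a + 2).toNat - a.toNat = 2 := by omega
  rw [h1, pvDropTakeTwo xs a.toNat hm,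
      PySem.List.pyGetD_eq_getElem xs (i := a) 0 h0 (by omega),
      PySem.List.pyGetD_eq_getElem xs (i := a + 1) 0 (by omega) (by omega)]
  have : (a + 1).toNat = a.toNat + 1 := by omega
  simp [List.getD, hm, Nat.lt_of_succ_lt hm, this]

lemma pvCond_iff (xs : List Int) (p q : Int) (hp : 0 ≤ p) (hp2 : p + 2 ≤ (xs.length : Int))
    (hq : 0 ≤ q) (hq2 : q + 2 ≤ (xs.length : Int)) :
    ((PySem.List.slice xs (some p) (some (p + 2)) == PySem.List.slice xs (some q) (some (q + 2))
      || PySem.List.slice xs (some p) (some (p + 2)) == (PySem.List.slice xs (some q) (some (q + 2))).reverse) = true)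
      ↔ pvKey xs p = pvKey xs q := by
  rw [pvSliceTwo xs p hp hp2, pvSliceTwo xs q hq hq2]
  simp only [pvKey, pvPairKey, List.reverse_cons, List.reverse_nil, List.nil_append,
    List.cons_append, Bool.or_eq_true, beq_iff_eq, List.cons.injEq, and_true]

lemma pvA_iff (xs : List Int) : error_2 xs = true ↔ pvTgt xs := by
  unfold error_2
  simp only [List.any_eq_true, PySem.List.mem_pyRange_one]
  constructor
  · rintro ⟨c1, ⟨hc1a, hc1b⟩, c2, ⟨hc2a, hc2b⟩, hcond⟩
    have h5 : c1 + c2 + 5 = (c1 + c2 + 3) + 2 := by ring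
    rw [h5] at hcond
    refine ⟨c1, c1 + c2 + 3, hc1a, by omega, by omega, ?_⟩
    exact (pvCond_iff xs c1 (c1 + c2 + 3) hc1a (by omega) (by omega) (by omega)).mp hcond
  · rintro ⟨p, q, hp, hpq, hq, hkey⟩
    refine ⟨p, ⟨hp, by omega⟩, q - p - 3, ⟨by omega, by omega⟩, ?_⟩
    have h1 : p + (q - p - 3) + 3 = q := by ring
    have h2 : p + (q - p - 3) + 5 = q + 2 := by ring
    rw [h1, h2, pvCond_iff xs p q hp (by omega) (by omega) (by omega)]
    exact hkey

-- invariant: first_seen maps each key to the first index < i carrying it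
def pvGood (xs : List Int) (d : PySem.Dict (Int × Int) Int) (i : Int) : Prop :=
  ∀ k : Int × Int,
    (d.get? k = none → ∀ j : Int, 0 ≤ j → j < i → pvKey xs j ≠ k) ∧
    (∀ v : Int, d.get? k = some v →
      0 ≤ v ∧ v < i ∧ pvKey xs v = k ∧ ∀ j : Int, 0 ≤ j → j < v → pvKey xs j ≠ k)

lemma pvGo_iff (xs : List Int) : ∀ (fuel : Nat) (d : PySem.Dict (Int × Int) Int) (i : Int),
    0 ≤ i → ((xs.length : Int) - 1 - i).toNat = fuel → pvGood xs d i →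
    (error_2_alt_go xs d (PySem.List.pyRange i ((xs.length : Int) - 1) 1) = true ↔
      ∃ p q : Int, 0 ≤ p ∧ p + 3 ≤ q ∧ i ≤ q ∧ q < (xs.length : Int) - 1 ∧ pvKey xs p = pvKey xs q) := by
  intro fuel
  induction fuel with
  | zero =>
    intro d i hi hf _
    rw [PySem.List.pyRange_one_eq_nil (by omega)]
    simp only [error_2_alt_go]
    constructor
    · intro h; exact absurd h (by simp)
    · rintro ⟨p, q, -, h2, h3, h4, -⟩
      exact absurd h4 (by omega)
  | succ n ih =>
    intro d i hi hf hGood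
    have hilt : i < (xs.length : Int) - 1 := by omega
    rw [PySem.List.pyRange_one_cons hilt]
    simp only [error_2_alt_go]
    have hkey : (if PySem.List.pyGetD xs i 0 ≤ PySem.List.pyGetD xs (i + 1) 0
        then (PySem.List.pyGetD xs i 0, PySem.List.pyGetD xs (i + 1) 0)
        else (PySem.List.pyGetD xs (i + 1) 0, PySem.List.pyGetD xs i 0)) = pvKey xs i := rfl
    rw [hkey]
    split
    next fp hd =>
      -- key already seen, first occurrence fp
      obtain ⟨hfp0, hfpi, hfpk, hfpmin⟩ := (hGood (pvKey xs i)).2 fp hd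
      by_cases hgap : 3 ≤ i - fp
      · rw [if_pos hgap]
        simp only [true_iff]
        exact ⟨fp, i, hfp0, by omega, le_refl i, hilt, hfpk⟩
      · rw [if_neg hgap, ih d (i + 1) (by omega) (by omega) ?_]
        · constructor
          · rintro ⟨p, q, h1, h2, h3, h4, h5⟩; exact ⟨p, q, h1, h2, by omega, h4, h5⟩
          · rintro ⟨p, q, h1, h2, h3, h4, h5⟩
            refine ⟨p, q, h1, h2, ?_, h4, h5⟩
            rcases lt_or_ge q (i + 1) with hq | hq
            · exfalso
              have hqi : q = i := by omega
              subst hqi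
              -- p has q's key, so fp ≤ p (fp minimal), contradicting gap < 3
              have hple : fp ≤ p := by
                by_contra hlt
                exact hfpmin p h1 (by omega) h5
              omega
            · omega
        · -- dict unchanged; invariant moves from i to i+1
          intro k
          refine ⟨?_, ?_⟩
          · intro hnone j hj0 hj1
            rcases lt_or_ge j i with hj | hj
            · exact (hGood k).1 hnone j hj0 hj
            · have hji : j = i := by omega
              subst hji
              intro h; subst h
              rw [hd] at hnone; cases hnone
          · intro v hv
            obtain ⟨a1, a2, a3, a4⟩ := (hGood k).2 v hv
            exact ⟨a1, by omega, a3, a4⟩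
    next hd =>
      -- key not seen yet: insert and recurse
      rw [ih (d.insert (pvKey xs i) i) (i + 1) (by omega) (by omega) ?_]
      · constructor
        · rintro ⟨p, q, h1, h2, h3, h4, h5⟩; exact ⟨p, q, h1, h2, by omega, h4, h5⟩
        · rintro ⟨p, q, h1, h2, h3, h4, h5⟩
          refine ⟨p, q, h1, h2, ?_, h4, h5⟩
          rcases lt_or_ge q (i + 1) with hq | hq
          · exfalso
            have hqi : q = i := by omega
            subst hqi
            exact (hGood (pvKey xs q)).1 hd p h1 (by omega) h5
          · omega
      · -- invariant holds after inserting the fresh key at index i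
        intro k
        by_cases hk : k = pvKey xs i
        · subst hk
          rw [PySem.Dict.get?_insert_self]
          refine ⟨?_, ?_⟩
          · intro h; cases h
          · rintro v hv
            injection hv with hv; subst hv
            exact ⟨hi, by omega, rfl, (hGood (pvKey xs i)).1 hd⟩
        · rw [PySem.Dict.get?_insert_of_ne d i hk]
          refine ⟨?_, ?_⟩
          · intro hnone j hj0 hj1
            rcases lt_or_ge j i with hj | hj
            · exact (hGood k).1 hnone j hj0 hj
            · have hji : j = i := by omega
              subst hji
              exact fun h => hk h.symm
          · intro v hv
            obtain ⟨a1, a2, a3, a4⟩ := (hGood k).2 v hv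
            exact ⟨a1, by omega, a3, a4⟩

lemma pvB_iff (xs : List Int) : error_2_alt xs = true ↔ pvTgt xs := by
  unfold error_2_alt
  rw [pvGo_iff xs ((xs.length : Int) - 1 - 0).toNat PySem.Dict.empty 0 (le_refl 0) rfl ?_]
  · constructor
    · rintro ⟨p, q, h1, h2, -, h4, h5⟩; exact ⟨p, q, h1, h2, h4, h5⟩
    · rintro ⟨p, q, h1, h2, h4, h5⟩; exact ⟨p, q, h1, h2, by omega, h4, h5⟩
  · intro k
    rw [PySem.Dict.get?_empty]
    exact ⟨fun _ j hj0 hj1 => absurd (lt_of_le_of_lt hj0 hj1) (lt_irrefl 0),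
           fun v hv => by cases hv⟩

-- ===== VERDICT (by name: the statement is the Claim_ definition above) =====
theorem error_2_spec : Claim_equal_error_2 := by
  intro xs _
  unfold Spec_error_2
  rcases hb : error_2_alt xs with _ | _
  · rcases ha : error_2 xs with _ | _
    · rfl
    · exact absurd (pvB_iff xs |>.mpr (pvA_iff xs |>.mp ha)) (by simp [hb])
  · exact pvA_iff xs |>.mpr (pvB_iff xs |>.mp hb)
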